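-- pv_equiv track=rewrite | github.com/tomdom35/HackerRank | Mars Exploration/Mars Exploration.py | marsExploration
-- ===== SOURCE A (Python) =====
-- def marsExploration(s):
--     c = "SOS"
--     count = 0
--     for index, i in enumerate(s):
--         idx = index%3
--         if i != c[idx]:
--             count += 1
--     return count
-- ===== SOURCE B (Python) =====
-- def marsExploration(s):
--     total = 0
--     for start in range(0, len(s), 3):
--         chunk = s[start:start+3]
--         total += sum(a != b for a, b in zip(chunk, "SOS"))
--     return total
-- ===== Notes on version B (the rewrite author's own statement) =====
-- stated objective: alternative
-- what changed: B walks the string in 3-character chunks and sums each chunk's mismatches against the pattern via zip (which stops at a trailing partial chunk), instead of A's per-character loop indexing the pattern by index%3.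
import Mathlib
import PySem

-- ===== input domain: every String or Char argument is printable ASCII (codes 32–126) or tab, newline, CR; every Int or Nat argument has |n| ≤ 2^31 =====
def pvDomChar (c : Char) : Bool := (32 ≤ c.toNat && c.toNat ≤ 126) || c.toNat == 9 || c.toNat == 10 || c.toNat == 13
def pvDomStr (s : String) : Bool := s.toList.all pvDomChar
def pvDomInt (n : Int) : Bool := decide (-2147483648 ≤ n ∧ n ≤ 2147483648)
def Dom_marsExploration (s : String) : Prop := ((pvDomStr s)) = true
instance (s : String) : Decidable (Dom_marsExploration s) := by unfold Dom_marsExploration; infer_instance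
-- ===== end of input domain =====

-- B walks the string in 3-character chunks and sums each chunk's mismatches against the pattern
-- via zip (stopping at a trailing partial chunk), instead of A's per-character loop indexing the
-- pattern by index%3. Same O(n) cost; alternative decomposition.

-- ===== PORT A =====
-- for index, i in enumerate(s): idx = index%3; if i != c[idx]: count += 1
def marsExploration (s : String) : Int :=
  (PySem.List.enumerate s.toList 0).foldl
    (fun count p =>
      match PySem.Str.pyGet? "SOS" (PySem.Int.mod p.1 3) with
      | some ch => if p.2 ≠ ch then count + 1 else count
      | none => count)   -- unreachable: index%3 ∈ {0,1,2}
    0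

-- ===== PORT B =====
-- sum(a != b for a, b in zip(chunk, "SOS"))
def chunkMismatch (chunk : List Char) : Int :=
  (chunk.zip "SOS".toList).foldl (fun acc p => acc + (if p.1 ≠ p.2 then 1 else 0)) 0

-- for start in range(0, len(s), 3): total += chunkMismatch(s[start:start+3])
def altLoop (l : List Char) (start : Nat) (total : Int) : Int :=
  if start < l.length then
    altLoop l (start + 3)
      (total + chunkMismatch (PySem.List.slice l (some (start : Int)) (some ((start : Int) + 3))))
  else total
termination_by l.length - start

def marsExploration_alt (s : String) : Int :=
  altLoop s.toList 0 0

-- ===== PRECONDITION & SPEC =====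
def Spec_marsExploration (s : String) (out : Int) : Prop := out = marsExploration_alt s
instance (s : String) (out : Int) : Decidable (Spec_marsExploration s out) := by unfold Spec_marsExploration; infer_instance

-- ===== CLAIM (what is proved, stated in full; the proofs are below) =====
def Claim_equal_marsExploration : Prop := ∀ (s : String), Dom_marsExploration s → Spec_marsExploration s (marsExploration s)


-- ===== LEMMAS AND PROOFS =====

-- one mismatch
def mChar (a b : Char) : Int := if a ≠ b then 1 else 0

def sosAt (p : Nat) : Char := if p = 0 then 'S' else if p = 1 then 'O' else 'S'

-- phase-tracking count: what A computes from phase p onward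
def phaseCount : List Char → Nat → Int
  | [], _ => 0
  | c :: r, p => mChar c (sosAt p) + phaseCount r ((p + 1) % 3)

-- chunk-wise count: what B computes, three characters at a time
def chunkCount : List Char → Int
  | [] => 0
  | [a] => mChar a 'S'
  | [a, b] => mChar a 'S' + mChar b 'O'
  | a :: b :: c :: r => mChar a 'S' + mChar b 'O' + mChar c 'S' + chunkCount r

lemma pyGet_sos (n : Nat) :
    PySem.Str.pyGet? "SOS" (PySem.Int.mod (n : Int) 3) = some (sosAt (n % 3)) := by
  have h3 : PySem.Int.mod (n : Int) 3 = ((n % 3 : Nat) : Int) := by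
    exact_mod_cast PySem.Int.mod_natCast n 3
  rw [h3]
  have : n % 3 = 0 ∨ n % 3 = 1 ∨ n % 3 = 2 := by omega
  rcases this with h | h | h <;> rw [h] <;> decide

lemma foldlA_eq (l : List Char) (n : Nat) (acc : Int) :
    (PySem.List.enumerate l (n : Int)).foldl
      (fun count p =>
        match PySem.Str.pyGet? "SOS" (PySem.Int.mod p.1 3) with
        | some ch => if p.2 ≠ ch then count + 1 else count
        | none => count) acc
      = acc + phaseCount l (n % 3) := by
  induction l generalizing n acc with
  | nil => simp [PySem.List.enumerate_nil, phaseCount]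
  | cons c r ih =>
    rw [PySem.List.enumerate_cons]
    simp only [List.foldl_cons]
    have hcast : (n : Int) + 1 = ((n + 1 : Nat) : Int) := by push_cast; ring
    rw [hcast, ih (n + 1)]
    rw [pyGet_sos n, phaseCount]
    have hmod : (n + 1) % 3 = (n % 3 + 1) % 3 := by omega
    rw [hmod]
    by_cases h : c ≠ sosAt (n % 3) <;> (simp [h, mChar]; try ring)

-- one step of B's loop absorbs one chunk
lemma chunk_step (a : Char) (r : List Char) :
    chunkMismatch ((a :: r).take 3) + chunkCount (r.drop 2) = chunkCount (a :: r) := by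
  match r with
  | [] => simp [chunkMismatch, chunkCount, List.zip, mChar]
  | [b] => simp [chunkMismatch, chunkCount, List.zip, mChar]
  | b :: c :: r' =>
    simp [chunkMismatch, chunkCount, List.zip, mChar]

lemma altLoop_eq (l : List Char) (start : Nat) (total : Int) :
    altLoop l start total = total + chunkCount (l.drop start) := by
  generalize hfuel : l.length - start = fuel
  induction fuel using Nat.strong_induction_on generalizing start total with
  | _ fuel ih =>
    rw [altLoop]
    by_cases hlt : start < l.length
    · simp only [if_pos hlt]
      rw [ih (l.length - (start + 3)) (by omega) (start + 3) _ rfl]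
      have hslice : PySem.List.slice l (some (start : Int)) (some ((start : Int) + 3))
          = (l.drop start).take 3 := by
        have := PySem.List.slice_natCast_add (xs := l) (j := start) (n := 3)
        simpa using this
      rw [hslice]
      have hdrop3 : l.drop (start + 3) = (l.drop start).drop 3 := by
        rw [List.drop_drop]
      rw [hdrop3]
      obtain ⟨a, r, hcons⟩ : ∃ a r, l.drop start = a :: r := by
        cases h : l.drop start with
        | nil => exact absurd (List.drop_eq_nil_iff.mp h) (by omega)
        | cons a r => exact ⟨a, r, rfl⟩
      rw [hcons]
      have h23 : (a :: r).drop 3 = r.drop 2 := rfl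
      rw [h23, add_assoc, chunk_step]
      try rfl
    · simp only [if_neg hlt]
      have hle : l.length ≤ start := by omega
      simp [List.drop_eq_nil_of_le hle, chunkCount]

lemma chunk_eq_phase (l : List Char) : chunkCount l = phaseCount l 0 := by
  induction l using chunkCount.induct with
  | case1 => simp [chunkCount, phaseCount]
  | case2 a => simp [chunkCount, phaseCount, sosAt]
  | case3 a b => simp [chunkCount, phaseCount, sosAt]; try ring
  | case4 a b c r ih =>
    simp only [chunkCount, phaseCount, ih]
    norm_num [sosAt]
    try ring

-- ===== VERDICT (by name: the statement is the Claim_ definition above) =====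
theorem marsExploration_spec : Claim_equal_marsExploration := by
  intro s _
  unfold Spec_marsExploration marsExploration marsExploration_alt
  have hA := foldlA_eq s.toList 0 0
  simp only [Nat.cast_zero] at hA
  rw [hA, altLoop_eq s.toList 0 0, List.drop_zero, chunk_eq_phase]
  try norm_num
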